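-- pv_equiv track=rewrite | github.com/ksumini/Algorithm-Study2.0 | Programmers/도넛과 막대 그래프/heewon.py | solution
-- ===== SOURCE A (Python) =====
-- from collections import defaultdict
-- from collections import defaultdict, deque
--
-- def validate(root, st_dict, en_dict):
--     nodes = {root}
--     queue = deque([root])
--     # 노드의 수 / 간선의 수
--     node_cnt = 0
--     edge_cnt = 0
--
--     # BFS로 그래프에 포함된 정점 찾기(DFS 재귀 활용시 최대 재귀 깊이 에러)
--     while queue:
--         cur = queue.popleft()
--         node_cnt += 1
--         edge_cnt += len(st_dict[cur])
--
--         for v in st_dict[cur]: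
--             if v not in nodes:
--                 nodes.add(v)
--                 queue.append(v)
--
--     # 도넛의 조건
--     if node_cnt == edge_cnt:
--         return 1
--     # 8자의 조건
--     elif node_cnt + 1 == edge_cnt:
--         return 3
--     # 나머지 경우 = 막대 경우
--     else:
--         return 2
--
-- def solution(edges):
--     # 생성된 정점 찾기
--     st_dict = defaultdict(list)
--     en_dict = defaultdict(int)
--
--     for st, en in edges:
--         st_dict[st].append(en)
--         en_dict[en] += 1
--
--     for st, lst in st_dict.items():
--         if len(lst) >= 2 and st not in en_dict:
--             root = st
--
--     answer = [root, 0, 0, 0]  # [정점, 도넛, 막대, 8자]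
--
--     # 생성된 정점에서 뻗은 간선 제거
--     for en in st_dict[root]:
--         en_dict[en] -= 1
--
--     # 그래프 탐색
--     for other_root in st_dict[root]:
--         idx = validate(other_root, st_dict, en_dict)
--         answer[idx] += 1
--
--     return answer
-- ===== SOURCE B (Python) =====
-- from collections import Counter
--
--
-- def solution(edges):
--     outdeg = Counter(s for s, _ in edges)
--     targets = {e for _, e in edges}
--     root = next(s for s, _ in edges if outdeg[s] >= 2 and s not in targets)
--     donut = bar = fig8 = 0
--     for c in [e for s, e in edges if s == root]:
--         seen = {c}
--         while True:
--             grown = seen | {e for s, e in edges if s in seen}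
--             if len(grown) == len(seen):
--                 break
--             seen = grown
--         n = len(seen)
--         m = sum(1 for s, _ in edges if s in seen)
--         if m == n:
--             donut += 1
--         elif m == n + 1:
--             fig8 += 1
--         else:
--             bar += 1
--     return [root, donut, bar, fig8]
-- ===== Notes on version B (the rewrite author's own statement) =====
-- stated objective: alternative
-- what changed: B builds no adjacency dict and no BFS queue at all: it finds the generated node by a degree test (Counter of sources, set of targets) with a first-match pick, and classifies each child's component by a round-based set-saturation fixpoint directly over the edge list (grow the reachable set by one relational image per round until stable), counting edges by filtering the edge list against the final set; Pre_ excludes inputs with more than one candidate generated node, where A's dict-overwrite loop accidentally keeps the last candidate while B's first-match next() keeps the first.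
-- outside the precondition, e.g. on solution([(0, 1), (0, 2), (3, 4), (3, 5)]): A returns [3, 0, 2, 0], B returns [0, 0, 2, 0]
import Mathlib
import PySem

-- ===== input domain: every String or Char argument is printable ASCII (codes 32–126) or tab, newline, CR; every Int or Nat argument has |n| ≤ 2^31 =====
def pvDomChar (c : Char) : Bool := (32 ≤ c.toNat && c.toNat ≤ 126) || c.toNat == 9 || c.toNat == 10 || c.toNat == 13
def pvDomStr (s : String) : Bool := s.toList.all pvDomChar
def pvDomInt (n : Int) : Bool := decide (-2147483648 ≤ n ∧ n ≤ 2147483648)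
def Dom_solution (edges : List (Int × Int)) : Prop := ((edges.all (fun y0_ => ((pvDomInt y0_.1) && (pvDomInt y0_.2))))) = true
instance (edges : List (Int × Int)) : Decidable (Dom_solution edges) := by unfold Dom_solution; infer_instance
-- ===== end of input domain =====

-- B drops A's adjacency dict and BFS queue entirely: it finds the generated node by a degree test
-- (a Counter of edge sources plus the set of edge targets, first match in edge order) and
-- classifies each child's component by a round-based set-saturation fixpoint computed directly
-- over the edge list; objective: alternative (same task, different algorithm, no speed claim).

-- ===== PORT A =====
-- answer[idx] += 1 for a nonnegative in-range index (exact here: validate returns 1, 2 or 3)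
def pyIncAt (l : List Int) (i : Nat) : List Int := l.set i (l.getD i 0 + 1)

-- 'while queue:' loop of validate; fuel is a totality guard only (edges.length + 1 always suffices,
-- proved below — it never changes the computed value on the actual calls)
def validateLoop (st_dict : PySem.Dict Int (List Int)) :
    Nat → PySem.Set Int → List Int → Int → Int → Int × Int
  | 0, _, _, node_cnt, edge_cnt => (node_cnt, edge_cnt)
  | _ + 1, _, [], node_cnt, edge_cnt => (node_cnt, edge_cnt)
  | fuel + 1, nodes, cur :: queue, node_cnt, edge_cnt =>
      let st := (st_dict.getD cur []).foldl
        (fun (s : PySem.Set Int × List Int) v =>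
          if s.1.contains v then s else (PySem.Set.add s.1 v, s.2 ++ [v])) (nodes, queue)
      validateLoop st_dict fuel st.1 st.2 (node_cnt + 1)
        (edge_cnt + ((st_dict.getD cur []).length : Int))

def validate (root : Int) (st_dict : PySem.Dict Int (List Int))
    (_en_dict : PySem.Dict Int Int) (fuel : Nat) : Int :=
  let r := validateLoop st_dict fuel (PySem.Set.ofList [root]) [root] 0 0
  if r.1 = r.2 then 1
  else if r.1 + 1 = r.2 then 3
  else 2

def solution (edges : List (Int × Int)) : List Int :=
  let dicts := edges.foldl
    (fun (d : PySem.Dict Int (List Int) × PySem.Dict Int Int) p =>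
      (d.1.modify p.1 [] (· ++ [p.2]), d.2.modify p.2 0 (· + 1)))
    (PySem.Dict.empty, PySem.Dict.empty)
  let st_dict := dicts.1
  let en_dict := dicts.2
  let rootOpt := st_dict.items.foldl
    (fun r p => if decide (2 ≤ p.2.length) && !(en_dict.contains p.1) then some p.1 else r)
    (none : Option Int)
  match rootOpt with
  | none => []  -- Python raises NameError here — excluded by Pre_solution
  | some root =>
      let en_dict2 := (st_dict.getD root []).foldl (fun d en => d.modify en 0 (· - 1)) en_dict
      let answer : List Int := [root, 0, 0, 0]
      (st_dict.getD root []).foldl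
        (fun ans c => pyIncAt ans (validate c st_dict en_dict2 (edges.length + 1)).toNat) answer

-- ===== PORT B =====
-- 'while True:' saturation loop of Source B: one relational image per round until the set stops
-- growing; fuel is a totality guard only (edges.length + 1 always suffices, proved below)
def satLoop (edges : List (Int × Int)) : Nat → PySem.Set Int → PySem.Set Int
  | 0, seen => seen
  | fuel + 1, seen =>
      let grown := edges.foldl
        (fun g p => if PySem.Set.contains seen p.1 then PySem.Set.add g p.2 else g) seen
      if grown.length = seen.length then seen else satLoop edges fuel grown

def solution_alt (edges : List (Int × Int)) : List Int :=
  let outdeg := PySem.Dict.counter (edges.map (·.1))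
  let targets := PySem.Set.ofList (edges.map (·.2))
  match edges.find? (fun p =>
      decide ((2 : Int) ≤ outdeg.getD p.1 0) && !(PySem.Set.contains targets p.1)) with
  | none => []  -- Python raises StopIteration here — excluded by Pre_solution
  | some rp =>
      let root := rp.1
      let children := (edges.filter (fun p => p.1 == root)).map (·.2)
      let t := children.foldl
        (fun (t : Int × Int × Int) c =>
          let seen := satLoop edges (edges.length + 1) (PySem.Set.ofList [c])
          let n : Int := (seen.length : Int)
          let m : Int := ((edges.filter (fun p => PySem.Set.contains seen p.1)).length : Int)
          if m = n then (t.1 + 1, t.2.1, t.2.2)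
          else if m = n + 1 then (t.1, t.2.1, t.2.2 + 1)
          else (t.1, t.2.1 + 1, t.2.2)) ((0 : Int), (0 : Int), (0 : Int))
      [root, t.1, t.2.1, t.2.2]

-- ===== PRECONDITION & SPEC =====
-- Pre_solution holds when a candidate generated node (out-degree ≥ 2, in-degree 0) exists and its
-- value is unique. Without one, Python A raises NameError (and B StopIteration); with several,
-- A's dict-overwrite loop accidentally keeps the LAST candidate while B's first-match next()
-- keeps the FIRST — a tie nobody would specify, so such inputs are excluded.
def Pre_solution (edges : List (Int × Int)) : Prop :=
  (∃ p ∈ edges, 2 ≤ (edges.filter (fun q => q.1 == p.1)).length ∧ ∀ q ∈ edges, q.2 ≠ p.1) ∧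
  (∀ p ∈ edges, ∀ q ∈ edges,
    (2 ≤ (edges.filter (fun r => r.1 == p.1)).length ∧ ∀ r ∈ edges, r.2 ≠ p.1) →
    (2 ≤ (edges.filter (fun r => r.1 == q.1)).length ∧ ∀ r ∈ edges, r.2 ≠ q.1) →
    p.1 = q.1)

instance (edges : List (Int × Int)) : Decidable (Pre_solution edges) := by
  unfold Pre_solution; infer_instance

def pvWitness_solution : (List (Int × Int)) := [(0, 1), (0, 2), (1, 1), (2, 2)]

def Spec_solution (edges : List (Int × Int)) (out : List Int) : Prop := out = solution_alt edges
instance (edges : List (Int × Int)) (out : List Int) : Decidable (Spec_solution edges out) := by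
  unfold Spec_solution; infer_instance

-- ===== CLAIM (what is proved, stated in full; the proofs are below) =====
def Claim_equal_solution : Prop :=
  ∀ (edges : List (Int × Int)), Dom_solution edges → Pre_solution edges →
    Spec_solution edges (solution edges)

-- ===== LEMMAS AND PROOFS =====

-- The single step relation of the graph, read off the edge list: b is a direct successor of a.
def StepE (edges : List (Int × Int)) (a b : Int) : Prop := ∃ p ∈ edges, p.1 = a ∧ p.2 = b

-- The same step relation, read off A's adjacency dict.
def AdjStep (d : PySem.Dict Int (List Int)) (a b : Int) : Prop := b ∈ d.getD a []

-- What a visited set / worklist pair will eventually cover.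
def CL (d : PySem.Dict Int (List Int)) (vis work : List Int) (x : Int) : Prop :=
  x ∈ vis ∨ ∃ w ∈ work, Relation.ReflTransGen (AdjStep d) w x

-- Worklist invariant of A's BFS queue.
def WInv (d : PySem.Dict Int (List Int)) (vis work : List Int) : Prop :=
  vis.Nodup ∧ work.Nodup ∧ (∀ x ∈ work, x ∈ vis) ∧
  (∀ x ∈ vis, x ∉ work → ∀ w ∈ d.getD x [], w ∈ vis)

-- A's inner 'for v in adj: if v not in nodes: add/enqueue' fold appends the same fresh
-- elements to the visited set and to the queue.
theorem foldStep_new (l : List Int) : ∀ (vis wk : List Int),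
    ∃ new : List Int,
      l.foldl (fun (s : PySem.Set Int × List Int) v =>
          if s.1.contains v then s else (PySem.Set.add s.1 v, s.2 ++ [v])) (vis, wk)
        = (vis ++ new, wk ++ new) ∧ new.Nodup ∧ (∀ x ∈ new, x ∈ l ∧ x ∉ vis) ∧
        (∀ x ∈ l, x ∈ vis ∨ x ∈ new) := by
  induction l with
  | nil => intro vis wk; exact ⟨[], by simp⟩
  | cons v t ih =>
    intro vis wk
    by_cases hv : v ∈ vis
    · obtain ⟨new, h1, h2, h3, h4⟩ := ih vis wk
      refine ⟨new, ?_, h2, ?_, ?_⟩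
      · simpa [List.foldl_cons, hv] using h1
      · exact fun x hx => ⟨List.mem_cons_of_mem _ (h3 x hx).1, (h3 x hx).2⟩
      · intro x hx
        rcases List.mem_cons.mp hx with rfl | hx
        · exact Or.inl hv
        · exact h4 x hx
    · obtain ⟨new, h1, h2, h3, h4⟩ := ih (vis ++ [v]) (wk ++ [v])
      have hvnew : v ∉ new := fun h => (h3 v h).2 (by simp)
      refine ⟨v :: new, ?_, ?_, ?_, ?_⟩
      · simpa [List.foldl_cons, hv, PySem.Set.add, List.append_assoc] using h1
      · exact List.nodup_cons.mpr ⟨hvnew, h2⟩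
      · intro x hx
        rcases List.mem_cons.mp hx with rfl | hx
        · exact ⟨by simp, hv⟩
        · refine ⟨List.mem_cons_of_mem _ (h3 x hx).1, fun hxv => (h3 x hx).2 (by simp [hxv])⟩
      · intro x hx
        rcases List.mem_cons.mp hx with rfl | hx
        · exact Or.inr (by simp)
        · rcases h4 x hx with h | h
          · rcases List.mem_append.mp h with h | h
            · exact Or.inl h
            · simp at h; subst h; exact Or.inr (by simp)
          · exact Or.inr (List.mem_cons_of_mem _ h)

theorem step_inv (d : PySem.Dict Int (List Int)) (vis l₁ l₂ new : List Int) (v : Int)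
    (hInv : WInv d vis (l₁ ++ v :: l₂))
    (hn1 : new.Nodup) (hn2 : ∀ x ∈ new, x ∈ d.getD v [] ∧ x ∉ vis)
    (hn3 : ∀ x ∈ d.getD v [], x ∈ vis ∨ x ∈ new) :
    WInv d (vis ++ new) ((l₁ ++ l₂) ++ new) := by
  obtain ⟨hv1, hv2, hv3, hv4⟩ := hInv
  have hmid := List.nodup_middle.mp hv2
  have hvnotin : v ∉ l₁ ++ l₂ := (List.nodup_cons.mp hmid).1
  have h12 : (l₁ ++ l₂).Nodup := (List.nodup_cons.mp hmid).2
  have hsub12 : ∀ x ∈ l₁ ++ l₂, x ∈ vis := by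
    intro x hx
    rcases List.mem_append.mp hx with h | h
    · exact hv3 x (List.mem_append.mpr (Or.inl h))
    · exact hv3 x (List.mem_append.mpr (Or.inr (List.mem_cons_of_mem _ h)))
  refine ⟨?_, ?_, ?_, ?_⟩
  · exact List.Nodup.append hv1 hn1 (fun a ha hb => (hn2 a hb).2 ha)
  · exact List.Nodup.append h12 hn1 (fun a ha hb => (hn2 a hb).2 (hsub12 a ha))
  · intro x hx
    rcases List.mem_append.mp hx with h | h
    · exact List.mem_append.mpr (Or.inl (hsub12 x h))
    · exact List.mem_append.mpr (Or.inr h)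
  · intro x hx hnx w hw
    rcases List.mem_append.mp hx with hxv | hxn
    · by_cases hxv' : x = v
      · subst hxv'
        rcases hn3 w hw with h | h
        · exact List.mem_append.mpr (Or.inl h)
        · exact List.mem_append.mpr (Or.inr h)
      · have hxw : x ∉ l₁ ++ v :: l₂ := by
          intro hmem
          apply hnx
          rcases List.mem_append.mp hmem with h | h
          · exact List.mem_append.mpr (Or.inl (List.mem_append.mpr (Or.inl h)))
          · rcases List.mem_cons.mp h with h | h
            · exact absurd h hxv'
            · exact List.mem_append.mpr (Or.inl (List.mem_append.mpr (Or.inr h)))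
        exact List.mem_append.mpr (Or.inl (hv4 x hxv hxw w hw))
    · exact absurd (List.mem_append.mpr (Or.inr hxn)) hnx

theorem reach_mem (d : PySem.Dict Int (List Int)) (vis work : List Int)
    (_hw : ∀ x ∈ work, x ∈ vis)
    (hfr : ∀ x ∈ vis, x ∉ work → ∀ w ∈ d.getD x [], w ∈ vis)
    {x y : Int} (h : Relation.ReflTransGen (AdjStep d) y x) (hy : y ∈ vis) :
    CL d vis work x := by
  revert hy
  induction h using Relation.ReflTransGen.head_induction_on with
  | refl => exact fun hx => Or.inl hx
  | @head a c h' hrest ih =>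
    intro ha
    by_cases haw : a ∈ work
    · exact Or.inr ⟨a, haw, Relation.ReflTransGen.head h' hrest⟩
    · exact ih (hfr a ha haw c h')

theorem step_cl (d : PySem.Dict Int (List Int)) (vis l₁ l₂ new : List Int) (v : Int)
    (hInv : WInv d vis (l₁ ++ v :: l₂))
    (hInv' : WInv d (vis ++ new) ((l₁ ++ l₂) ++ new))
    (hn2 : ∀ x ∈ new, x ∈ d.getD v [] ∧ x ∉ vis)
    (x : Int) :
    CL d (vis ++ new) ((l₁ ++ l₂) ++ new) x ↔ CL d vis (l₁ ++ v :: l₂) x := by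
  obtain ⟨hv1, hv2, hv3, hv4⟩ := hInv
  obtain ⟨hv1', hv2', hv3', hv4'⟩ := hInv'
  have hvmem : v ∈ vis := hv3 v (by simp)
  constructor
  · rintro (hx | ⟨w, hwmem, hpath⟩)
    · rcases List.mem_append.mp hx with h | h
      · exact Or.inl h
      · exact Or.inr ⟨v, by simp, Relation.ReflTransGen.single (hn2 _ h).1⟩
    · rcases List.mem_append.mp hwmem with h | h
      · rcases List.mem_append.mp h with h1 | h1
        · exact Or.inr ⟨w, by simp [h1], hpath⟩
        · exact Or.inr ⟨w, by simp [h1], hpath⟩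
      · exact Or.inr ⟨v, by simp, Relation.ReflTransGen.head (hn2 _ h).1 hpath⟩
  · rintro (hx | ⟨w, hwmem, hpath⟩)
    · exact Or.inl (List.mem_append.mpr (Or.inl hx))
    · rcases List.mem_append.mp hwmem with h | h
      · exact Or.inr ⟨w, by simp [h], hpath⟩
      · rcases List.mem_cons.mp h with rfl | h
        · exact reach_mem d _ _ hv3' hv4' hpath (List.mem_append.mpr (Or.inl hvmem))
        · exact Or.inr ⟨w, by simp [h], hpath⟩

theorem sum_filter_toggle (f : Int → Int) (p p' : Int → Bool) (v : Int) :
    ∀ l : List Int, l.Nodup → v ∈ l → p v = false → p' v = true →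
      (∀ x ∈ l, x ≠ v → p' x = p x) →
      ((l.filter p').map f).sum = ((l.filter p).map f).sum + f v := by
  intro l
  induction l with
  | nil => simp
  | cons a t ih =>
    intro hnd hv hp hp' hagree
    rcases List.mem_cons.mp hv with rfl | hvt
    · have hvt : v ∉ t := (List.nodup_cons.mp hnd).1
      have ht : t.filter p' = t.filter p := by
        apply List.filter_congr
        intro x hx
        exact hagree x (List.mem_cons_of_mem _ hx) (fun h => hvt (h ▸ hx))
      simp only [List.filter_cons, hp, hp', if_pos, Bool.false_eq_true, if_false, ht,
        List.map_cons, List.sum_cons]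
      ring
    · have hne : a ≠ v := fun h => (List.nodup_cons.mp hnd).1 (h ▸ hvt)
      have ha : p' a = p a := hagree a (by simp) hne
      have ihh := ih (List.nodup_cons.mp hnd).2 hvt hp hp'
        (fun x hx hxv => hagree x (List.mem_cons_of_mem _ hx) hxv)
      cases hpa : p a
      · simp only [List.filter_cons, ha, hpa, Bool.false_eq_true, if_false, ihh]
      · simp only [List.filter_cons, ha, hpa, if_true, List.map_cons, List.sum_cons, ihh]
        ring

theorem bfs_spec (d : PySem.Dict Int (List Int)) (U : List Int)
    (hU : ∀ a b, b ∈ d.getD a [] → b ∈ U) :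
    ∀ (fuel : Nat) (vis work : List Int) (n e : Int),
      WInv d vis work → (∀ x ∈ vis, x ∈ U) →
      U.length + work.length ≤ fuel + vis.length →
      n = (vis.length : Int) - (work.length : Int) →
      e = ((vis.filter (fun x => !(work.contains x))).map
            (fun v => ((d.getD v []).length : Int))).sum →
      ∃ visF : List Int, visF.Nodup ∧ (∀ x, x ∈ visF ↔ CL d vis work x) ∧
        validateLoop d fuel vis work n e
          = ((visF.length : Int), (visF.map (fun v => ((d.getD v []).length : Int))).sum) := by
  have hsub : ∀ (vis : List Int), vis.Nodup → (∀ x ∈ vis, x ∈ U) → vis.length ≤ U.length := by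
    intro vis hnd hs
    have h1 : vis.toFinset.card = vis.length := List.toFinset_card_of_nodup hnd
    have h2 : vis.toFinset ⊆ U.toFinset := by
      intro a ha; simp only [List.mem_toFinset] at *; exact hs a ha
    calc vis.length = vis.toFinset.card := h1.symm
      _ ≤ U.toFinset.card := Finset.card_le_card h2
      _ ≤ U.length := U.toFinset_card_le
  intro fuel
  induction fuel with
  | zero =>
    intro vis work n e hInv hvisU hfuel hn he
    have hwork : work = [] := List.eq_nil_of_length_eq_zero
      (by have := hsub vis hInv.1 hvisU; omega)
    subst hwork
    refine ⟨vis, hInv.1, fun x => by simp [CL], ?_⟩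
    simp only [validateLoop]
    simp only [List.length_nil, Nat.cast_zero, sub_zero] at hn
    have he' : e = (vis.map (fun v => ((d.getD v []).length : Int))).sum := by
      simpa using he
    rw [hn, he']
  | succ fuel ih =>
    intro vis work n e hInv hvisU hfuel hn he
    cases work with
    | nil =>
      refine ⟨vis, hInv.1, fun x => by simp [CL], ?_⟩
      simp only [validateLoop]
      simp only [List.length_nil, Nat.cast_zero, sub_zero] at hn
      have he' : e = (vis.map (fun v => ((d.getD v []).length : Int))).sum := by
        simpa using he
      rw [hn, he']
    | cons cur rest =>
      obtain ⟨new, hfold, hnd, hmem, hcov⟩ := foldStep_new (d.getD cur []) vis rest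
      have hInv0 : WInv d vis ([] ++ cur :: rest) := by simpa using hInv
      have hInv' : WInv d (vis ++ new) (([] ++ rest) ++ new) :=
        step_inv d vis [] rest new cur hInv0 hnd hmem hcov
      have hInv'' : WInv d (vis ++ new) (rest ++ new) := by simpa using hInv'
      have hcl := step_cl d vis [] rest new cur hInv0 hInv' hmem
      have hcur : cur ∈ vis := hInv.2.2.1 cur (by simp)
      have hstep : validateLoop d (fuel + 1) vis (cur :: rest) n e
          = validateLoop d fuel (vis ++ new) (rest ++ new) (n + 1)
              (e + ((d.getD cur []).length : Int)) := by
        simp only [validateLoop, hfold]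
      have hnew_sub : ∀ x ∈ new, x ∈ U := fun x hx => hU cur x (hmem x hx).1
      have harith1 : U.length + (rest ++ new).length ≤ fuel + (vis ++ new).length := by
        simp only [List.length_append] at *
        simp only [List.length_cons] at hfuel
        omega
      have harith2 : n + 1 = ((vis ++ new).length : Int) - ((rest ++ new).length : Int) := by
        simp only [List.length_append, List.length_cons] at *
        push_cast at *
        omega
      have hcurrest : cur ∉ rest := (List.nodup_cons.mp hInv.2.1).1
      have hcurnew : cur ∉ new := fun h => (hmem cur h).2 hcur
      have harith3 : e + ((d.getD cur []).length : Int)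
          = (((vis ++ new).filter (fun x => !((rest ++ new).contains x))).map
              (fun v => ((d.getD v []).length : Int))).sum := by
        rw [List.filter_append]
        have hnewnil : new.filter (fun x => !((rest ++ new).contains x)) = [] := by
          apply List.filter_eq_nil_iff.mpr
          intro a ha
          simp [List.contains_eq_mem, List.mem_append, ha]
        rw [hnewnil, List.append_nil]
        rw [sum_filter_toggle (fun v => ((d.getD v []).length : Int))
          (fun x => !((cur :: rest).contains x)) (fun x => !((rest ++ new).contains x))
          cur vis hInv.1 hcur (by simp [List.contains_eq_mem])
          (by simp [List.contains_eq_mem, List.mem_append, hcurrest, hcurnew])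
          (fun x hx hxv => by
            have hxnew : x ∉ new := fun h => (hmem x h).2 hx
            simp [List.contains_eq_mem, List.mem_append, hxnew, hxv])]
        rw [he]
      obtain ⟨visF, hF1, hF2, hF3⟩ := ih (vis ++ new) (rest ++ new) (n + 1)
        (e + ((d.getD cur []).length : Int)) hInv''
        (fun x hx => (List.mem_append.mp hx).elim (hvisU x) (hnew_sub x))
        harith1 harith2 harith3
      refine ⟨visF, hF1, ?_, ?_⟩
      · intro x
        rw [hF2 x]
        have := hcl x
        simpa using this
      · rw [hstep, hF3]

-- B's relational-image fold: the grown set is the old set plus fresh successors of old members.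
theorem growFold (seen : List Int) :
    ∀ (l : List (Int × Int)) (g : List Int), g.Nodup →
      ∃ new : List Int,
        l.foldl (fun g p => if PySem.Set.contains seen p.1 then PySem.Set.add g p.2 else g) g
          = g ++ new ∧ (g ++ new).Nodup ∧
        (∀ x ∈ new, ∃ p ∈ l, p.1 ∈ seen ∧ p.2 = x) ∧
        (∀ p ∈ l, p.1 ∈ seen → p.2 ∈ g ++ new) := by
  intro l
  induction l with
  | nil => intro g hg; exact ⟨[], by simp [hg]⟩
  | cons p t ih =>
    intro g hg
    by_cases hp : p.1 ∈ seen
    · by_cases hm : p.2 ∈ g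
      · obtain ⟨new, h1, h2, h3, h4⟩ := ih g hg
        refine ⟨new, ?_, h2, ?_, ?_⟩
        · simpa [List.foldl_cons, PySem.Set.contains, List.contains_eq_mem, hp,
            PySem.Set.add, hm] using h1
        · exact fun x hx => (h3 x hx).imp (fun q hq => ⟨List.mem_cons_of_mem _ hq.1, hq.2⟩)
        · intro q hq hq1
          rcases List.mem_cons.mp hq with rfl | hq
          · exact List.mem_append.mpr (Or.inl hm)
          · exact h4 q hq hq1
      · obtain ⟨new, h1, h2, h3, h4⟩ := ih (g ++ [p.2])
          (by
            rw [List.nodup_append]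
            refine ⟨hg, List.nodup_singleton _, ?_⟩
            intro x hx b hb
            simp only [List.mem_singleton] at hb
            exact fun h => hm ((h.trans hb) ▸ hx))
        refine ⟨p.2 :: new, ?_, by rw [List.append_assoc] at h2; exact h2, ?_, ?_⟩
        · simpa [List.foldl_cons, PySem.Set.contains, List.contains_eq_mem, hp,
            PySem.Set.add, hm, List.append_assoc] using h1
        · intro x hx
          rcases List.mem_cons.mp hx with rfl | hx
          · exact ⟨p, by simp, hp, rfl⟩
          · exact (h3 x hx).imp (fun q hq => ⟨List.mem_cons_of_mem _ hq.1, hq.2⟩)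
        · intro q hq hq1
          rcases List.mem_cons.mp hq with rfl | hq
          · simp
          · have := h4 q hq hq1
            rcases List.mem_append.mp this with h | h
            · rcases List.mem_append.mp h with h | h
              · exact List.mem_append.mpr (Or.inl h)
              · simp at h; rw [h]; simp
            · exact List.mem_append.mpr (Or.inr (List.mem_cons_of_mem _ h))
    · obtain ⟨new, h1, h2, h3, h4⟩ := ih g hg
      refine ⟨new, ?_, h2, ?_, ?_⟩
      · simpa [List.foldl_cons, PySem.Set.contains, List.contains_eq_mem, hp] using h1
      · exact fun x hx => (h3 x hx).imp (fun q hq => ⟨List.mem_cons_of_mem _ hq.1, hq.2⟩)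
      · intro q hq hq1
        rcases List.mem_cons.mp hq with rfl | hq
        · exact absurd hq1 hp
        · exact h4 q hq hq1

-- reachable points stay inside any successor-closed set containing the start
theorem rtg_mem_of_closed (edges : List (Int × Int)) (S : List Int) (c x : Int)
    (hc : c ∈ S) (hcl : ∀ p ∈ edges, p.1 ∈ S → p.2 ∈ S)
    (h : Relation.ReflTransGen (StepE edges) c x) : x ∈ S := by
  induction h with
  | refl => exact hc
  | tail _ hs ih =>
    obtain ⟨p, hp, hp1, hp2⟩ := hs
    exact hp2 ▸ hcl p hp (hp1 ▸ ih)

-- the saturation loop computes exactly the reachable set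
theorem sat_spec (edges : List (Int × Int)) (c : Int) :
    ∀ (fuel : Nat) (seen : List Int),
      seen.Nodup → c ∈ seen →
      (∀ x ∈ seen, Relation.ReflTransGen (StepE edges) c x) →
      (∀ x ∈ seen, x ∈ c :: edges.map (·.2)) →
      (c :: edges.map (·.2)).toFinset.card ≤ fuel + seen.length →
      (satLoop edges fuel seen).Nodup ∧
        ∀ x, x ∈ satLoop edges fuel seen ↔ Relation.ReflTransGen (StepE edges) c x := by
  intro fuel
  induction fuel with
  | zero =>
    intro seen hnd hc hreach hU hfuel
    have hcard : seen.length = seen.toFinset.card := (List.toFinset_card_of_nodup hnd).symm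
    have hsubF : seen.toFinset ⊆ (c :: edges.map (·.2)).toFinset := by
      intro a ha; simp only [List.mem_toFinset] at *; exact hU a ha
    have hEq : seen.toFinset = (c :: edges.map (·.2)).toFinset := by
      apply Finset.eq_of_subset_of_card_le hsubF
      omega
    have hall : ∀ x ∈ c :: edges.map (·.2), x ∈ seen := by
      intro x hx
      have : x ∈ seen.toFinset := by rw [hEq]; simpa using hx
      simpa using this
    refine ⟨hnd, fun x => ⟨hreach x, ?_⟩⟩
    intro h
    exact rtg_mem_of_closed edges seen c x hc
      (fun p hp _ => hall p.2 (List.mem_cons_of_mem _ (List.mem_map.mpr ⟨p, hp, rfl⟩))) h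
  | succ fuel ih =>
    intro seen hnd hc hreach hU hfuel
    obtain ⟨new, h1, h2, h3, h4⟩ := growFold seen edges seen hnd
    by_cases hlen : (edges.foldl
        (fun g p => if PySem.Set.contains seen p.1 then PySem.Set.add g p.2 else g) seen).length
        = seen.length
    · have hstep : satLoop edges (fuel + 1) seen = seen := by
        simp only [satLoop, hlen, if_pos]
      have hnewnil : new = [] := by
        rw [h1] at hlen
        simp only [List.length_append] at hlen
        exact List.eq_nil_of_length_eq_zero (by omega)
      subst hnewnil
      rw [hstep]
      refine ⟨hnd, fun x => ⟨hreach x, ?_⟩⟩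
      intro h
      exact rtg_mem_of_closed edges seen c x hc
        (fun p hp hps => by simpa using h4 p hp hps) h
    · have hstep : satLoop edges (fuel + 1) seen = satLoop edges fuel (seen ++ new) := by
        simp only [satLoop]
        rw [if_neg hlen, h1]
      have hnn : new ≠ [] := by
        intro hn; subst hn; rw [h1] at hlen; simp at hlen
      have hlen1 : 1 ≤ new.length := by
        cases new with
        | nil => exact absurd rfl hnn
        | cons _ _ => simp
      have hrec := ih (seen ++ new) h2
        (List.mem_append.mpr (Or.inl hc))
        (by
          intro x hx
          rcases List.mem_append.mp hx with h | h
          · exact hreach x h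
          · obtain ⟨p, hp, hp1, hp2⟩ := h3 x h
            exact Relation.ReflTransGen.tail (hreach p.1 hp1) ⟨p, hp, rfl, hp2⟩)
        (by
          intro x hx
          rcases List.mem_append.mp hx with h | h
          · exact hU x h
          · obtain ⟨p, hp, _, hp2⟩ := h3 x h
            exact List.mem_cons_of_mem _ (List.mem_map.mpr ⟨p, hp, hp2⟩))
        (by simp only [List.length_append] at *; omega)
      rw [hstep]
      exact hrec

-- counting edges whose source lies in a duplicate-free list, one source at a time
theorem filter_mem_cons_split (a : Int) (t : List Int) (ha : a ∉ t)
    (edges : List (Int × Int)) :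
    (edges.filter (fun p => decide (p.1 ∈ a :: t))).length
      = (edges.filter (fun p => p.1 == a)).length
        + (edges.filter (fun p => decide (p.1 ∈ t))).length := by
  induction edges with
  | nil => simp
  | cons q e ih =>
    simp only [List.filter_cons]
    by_cases hq : q.1 = a
    · have c1 : (decide (q.1 ∈ a :: t)) = true := by simp [hq]
      have c2 : (q.1 == a) = true := by simp [hq]
      have c3 : (decide (q.1 ∈ t)) = false := by simp [hq, ha]
      rw [if_pos c1, if_pos c2, if_neg (by simp [c3])]
      simp only [List.length_cons, ih]
      omega
    · by_cases hq2 : q.1 ∈ t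
      · have c1 : (decide (q.1 ∈ a :: t)) = true := by simp [hq2]
        have c2 : (q.1 == a) = false := by simp [hq]
        have c3 : (decide (q.1 ∈ t)) = true := by simp [hq2]
        rw [if_pos c1, if_neg (by simp [c2]), if_pos c3]
        simp only [List.length_cons, ih]
        omega
      · have c1 : (decide (q.1 ∈ a :: t)) = false := by simp [hq, hq2]
        have c2 : (q.1 == a) = false := by simp [hq]
        have c3 : (decide (q.1 ∈ t)) = false := by simp [hq2]
        rw [if_neg (by rw [c1]; simp), if_neg (by rw [c2]; simp), if_neg (by rw [c3]; simp)]
        exact ih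

-- sum of out-degrees over a duplicate-free set = number of edges with source in the set
theorem sum_outdeg (edges : List (Int × Int)) :
    ∀ l : List Int, l.Nodup →
      (l.map (fun v => ((edges.filter (fun p => p.1 == v)).length : Int))).sum
        = ((edges.filter (fun p => decide (p.1 ∈ l))).length : Int) := by
  intro l
  induction l with
  | nil => simp
  | cons a t ih =>
    intro hnd
    have ha : a ∉ t := (List.nodup_cons.mp hnd).1
    rw [List.map_cons, List.sum_cons, ih (List.nodup_cons.mp hnd).2,
      filter_mem_cons_split a t ha edges]
    push_cast
    ring

-- length of a deduplicating Set build is at most the source length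
theorem len_ofList_le (l : List Int) : (PySem.Set.ofList l).length ≤ l.length := by
  rw [PySem.Set.ofList_eq_foldl]
  have aux : ∀ (t : List Int) (s : PySem.Set Int),
      (t.foldl PySem.Set.add s).length ≤ s.length + t.length := by
    intro t
    induction t with
    | nil => simp
    | cons a t ih =>
      intro s
      have hadd : (PySem.Set.add s a).length ≤ s.length + 1 := by
        simp only [PySem.Set.add]
        split <;> simp
      calc ((a :: t).foldl PySem.Set.add s).length
          = (t.foldl PySem.Set.add (PySem.Set.add s a)).length := by simp
        _ ≤ (PySem.Set.add s a).length + t.length := ih _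
        _ ≤ s.length + (a :: t).length := by simp at hadd ⊢; omega
  simpa using aux l []

-- a last-match overwrite loop is a find? on the reversed list
theorem foldl_lastSome {α β : Type} (p : α → Bool) (f : α → β) :
    ∀ (l : List α) (init : Option β),
      l.foldl (fun r x => if p x then some (f x) else r) init
        = ((l.reverse.find? p).map f).or init := by
  intro l
  induction l with
  | nil => intro init; simp
  | cons a t ih =>
    intro init
    simp only [List.foldl_cons, List.reverse_cons, List.find?_append]
    rw [ih]
    cases hfind : t.reverse.find? p with
    | some y => simp
    | none =>
      cases hpa : p a <;> simp [List.find?, hpa]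

-- proof-side names for the dictionaries A builds
def stD (edges : List (Int × Int)) : PySem.Dict Int (List Int) :=
  edges.foldl (fun d p => d.modify p.1 [] (· ++ [p.2])) PySem.Dict.empty

def enD (edges : List (Int × Int)) : PySem.Dict Int Int :=
  edges.foldl (fun d p => d.modify p.2 0 (· + 1)) PySem.Dict.empty

theorem stD_getD (edges : List (Int × Int)) (c : Int) :
    (stD edges).getD c [] = (edges.filter (fun p => p.1 == c)).map (·.2) := by
  have h := PySem.Dict.getD_foldl_modify_append edges PySem.Dict.empty c
  simpa [stD] using h

theorem stD_keys_nodup (edges : List (Int × Int)) : (stD edges).keys.Nodup := by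
  have h := PySem.Dict.nodup_keys_foldl_modify_key edges (·.1) []
    (fun _ p => (· ++ [p.2])) PySem.Dict.empty (by simp)
  simpa [stD] using h

theorem stD_keys (edges : List (Int × Int)) :
    (stD edges).keys = PySem.Set.ofList (edges.map (·.1)) := by
  have h := PySem.Dict.keys_foldl_modify_key edges (·.1) []
    (fun _ p => (· ++ [p.2])) PySem.Dict.empty
  simpa [stD, PySem.Set.update, PySem.Set.ofList_eq_foldl] using h

theorem enD_contains (edges : List (Int × Int)) (k : Int) :
    (enD edges).contains k = PySem.Set.contains (PySem.Set.ofList (edges.map (·.2))) k := by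
  have hk : (enD edges).keys = PySem.Set.ofList (edges.map (·.2)) := by
    have h := PySem.Dict.keys_foldl_modify_key edges (·.2) (0 : Int)
      (fun _ _ => (· + 1)) PySem.Dict.empty
    simpa [enD, PySem.Set.update, PySem.Set.ofList_eq_foldl] using h
  rw [← Bool.coe_iff_coe, PySem.Dict.contains_iff_mem_keys, hk]
  simp [PySem.Set.contains, List.contains_eq_mem]

-- StepE is the adjacency-dict step relation
theorem adjStep_iff (edges : List (Int × Int)) (a b : Int) :
    AdjStep (stD edges) a b ↔ StepE edges a b := by
  simp only [AdjStep, StepE, stD_getD, List.mem_map, List.mem_filter, beq_iff_eq]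
  constructor
  · rintro ⟨p, ⟨hp, hp1⟩, hp2⟩; exact ⟨p, hp, hp1, hp2⟩
  · rintro ⟨p, hp, hp1, hp2⟩; exact ⟨p, ⟨hp, hp1⟩, hp2⟩

-- per-child agreement: A's BFS counters are exactly |seen| and the in-set edge count of B's
-- saturated set
theorem child_pair (edges : List (Int × Int)) (c : Int) :
    validateLoop (stD edges) (edges.length + 1) (PySem.Set.ofList [c]) [c] 0 0
      = (((satLoop edges (edges.length + 1) (PySem.Set.ofList [c])).length : Int),
         ((edges.filter (fun p =>
            PySem.Set.contains (satLoop edges (edges.length + 1) (PySem.Set.ofList [c])) p.1)).length : Int)) := by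
  have hU : ∀ a b, b ∈ (stD edges).getD a [] → b ∈ PySem.Set.ofList (c :: edges.map (·.2)) := by
    intro a b hb
    rw [stD_getD] at hb
    obtain ⟨p, hp, rfl⟩ := List.mem_map.mp hb
    have hpe : p ∈ edges := List.mem_of_mem_filter hp
    refine (PySem.Set.mem_ofList _ _).mpr ?_
    exact List.mem_cons_of_mem _ (List.mem_map.mpr ⟨p, hpe, rfl⟩)
  have hInv0 : WInv (stD edges) [c] [c] := by
    refine ⟨List.nodup_singleton c, List.nodup_singleton c, by simp, ?_⟩
    intro x hx hnx w hw
    simp only [List.mem_singleton] at hx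
    subst hx
    exact absurd (by simp) hnx
  have hvisU : ∀ x ∈ ([c] : List Int), x ∈ PySem.Set.ofList (c :: edges.map (·.2)) := by
    intro x hx
    simp only [List.mem_singleton] at hx
    subst hx
    exact (PySem.Set.mem_ofList _ _).mpr (by simp)
  have hfuel : (PySem.Set.ofList (c :: edges.map (·.2))).length + ([c] : List Int).length
      ≤ (edges.length + 1) + ([c] : List Int).length := by
    have h := len_ofList_le (c :: edges.map (·.2))
    simp only [List.length_cons, List.length_map] at h ⊢
    omega
  obtain ⟨visF, hF1, hF2, hF3⟩ := bfs_spec (stD edges) _ hU (edges.length + 1) [c] [c] 0 0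
    hInv0 hvisU hfuel (by simp) (by simp [List.contains_eq_mem])
  have hfuelS : (c :: edges.map (·.2)).toFinset.card
      ≤ (edges.length + 1) + ([c] : List Int).length := by
    have h := (c :: edges.map (·.2)).toFinset_card_le
    simp only [List.length_cons, List.length_map] at h ⊢
    omega
  obtain ⟨hS1, hS2⟩ := sat_spec edges c (edges.length + 1) [c]
    (List.nodup_singleton c) (by simp)
    (by
      intro x hx
      simp only [List.mem_singleton] at hx
      subst hx
      exact Relation.ReflTransGen.refl)
    (by simp) hfuelS
  have hmemiff : ∀ x, x ∈ visF ↔ x ∈ satLoop edges (edges.length + 1) [c] := by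
    intro x
    rw [hF2 x, hS2 x]
    constructor
    · rintro (hx | ⟨w, hw, hpath⟩)
      · simp only [List.mem_singleton] at hx; subst hx; exact Relation.ReflTransGen.refl
      · simp only [List.mem_singleton] at hw; subst hw
        exact Relation.ReflTransGen.mono (fun a b h => (adjStep_iff edges a b).mp h) hpath
    · intro h
      exact Or.inr ⟨c, by simp,
        Relation.ReflTransGen.mono (fun a b h => (adjStep_iff edges a b).mpr h) h⟩
  have hperm : visF.Perm (satLoop edges (edges.length + 1) [c]) :=
    (List.perm_ext_iff_of_nodup hF1 hS1).mpr hmemiff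
  have hofl : PySem.Set.ofList [c] = [c] := rfl
  rw [hofl, hF3]
  simp only [Prod.mk.injEq]
  constructor
  · rw [hperm.length_eq]
  · calc (visF.map (fun v => (((stD edges).getD v []).length : Int))).sum
        = (visF.map (fun v => ((edges.filter (fun p => p.1 == v)).length : Int))).sum := by
          apply congrArg
          apply List.map_congr_left
          intro v _
          rw [stD_getD, List.length_map]
      _ = ((satLoop edges (edges.length + 1) [c]).map
            (fun v => ((edges.filter (fun p => p.1 == v)).length : Int))).sum :=
          List.Perm.sum_eq (hperm.map _)
      _ = ((edges.filter (fun p =>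
            decide (p.1 ∈ satLoop edges (edges.length + 1) [c]))).length : Int) :=
          sum_outdeg edges _ hS1
      _ = _ := by simp [PySem.Set.contains, List.contains_eq_mem]

theorem fold_counts (d : PySem.Dict Int (List Int)) (en2 : PySem.Dict Int Int) (fuel : Nat)
    (pair : Int → Int × Int) :
    ∀ (cs : List Int) (r x y z : Int),
      (∀ c ∈ cs, validateLoop d fuel (PySem.Set.ofList [c]) [c] 0 0 = pair c) →
      cs.foldl (fun ans c => pyIncAt ans (validate c d en2 fuel).toNat) [r, x, y, z]
        = [r,
           (cs.foldl (fun t c =>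
              if (pair c).2 = (pair c).1 then (t.1 + 1, t.2.1, t.2.2)
              else if (pair c).2 = (pair c).1 + 1 then (t.1, t.2.1, t.2.2 + 1)
              else (t.1, t.2.1 + 1, t.2.2)) ((x : Int), (y : Int), (z : Int))).1,
           (cs.foldl (fun t c =>
              if (pair c).2 = (pair c).1 then (t.1 + 1, t.2.1, t.2.2)
              else if (pair c).2 = (pair c).1 + 1 then (t.1, t.2.1, t.2.2 + 1)
              else (t.1, t.2.1 + 1, t.2.2)) ((x : Int), (y : Int), (z : Int))).2.1,
           (cs.foldl (fun t c =>
              if (pair c).2 = (pair c).1 then (t.1 + 1, t.2.1, t.2.2)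
              else if (pair c).2 = (pair c).1 + 1 then (t.1, t.2.1, t.2.2 + 1)
              else (t.1, t.2.1 + 1, t.2.2)) ((x : Int), (y : Int), (z : Int))).2.2] := by
  intro cs
  induction cs with
  | nil => intro r x y z h; simp
  | cons c cs ih =>
    intro r x y z h
    have hc := h c (by simp)
    have hrec := fun x y z => ih r x y z (fun c' hc' => h c' (List.mem_cons_of_mem _ hc'))
    simp only [List.foldl_cons]
    have hval : validate c d en2 fuel
        = if (pair c).1 = (pair c).2 then 1
          else if (pair c).1 + 1 = (pair c).2 then 3 else 2 := by
      simp only [validate, hc]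
    by_cases h1 : (pair c).1 = (pair c).2
    · have hstep : pyIncAt [r, x, y, z] (validate c d en2 fuel).toNat = [r, x + 1, y, z] := by
        rw [hval, if_pos h1]; rfl
      rw [hstep, if_pos h1.symm]
      exact hrec (x + 1) y z
    · by_cases h2 : (pair c).1 + 1 = (pair c).2
      · have hstep : pyIncAt [r, x, y, z] (validate c d en2 fuel).toNat = [r, x, y, z + 1] := by
          rw [hval, if_neg h1, if_pos h2]; rfl
        rw [hstep, if_neg (fun hh => h1 hh.symm), if_pos h2.symm]
        exact hrec x y (z + 1)
      · have hstep : pyIncAt [r, x, y, z] (validate c d en2 fuel).toNat = [r, x, y + 1, z] := by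
          rw [hval, if_neg h1, if_neg h2]; rfl
        rw [hstep, if_neg (fun hh => h1 hh.symm), if_neg (fun hh => h2 hh.symm)]
        exact hrec x (y + 1) z

-- ===== VERDICT (by name: the statement is the Claim_ definition above) =====
theorem solution_spec : Claim_equal_solution := by
  unfold Claim_equal_solution
  intro edges _hdom hpre
  unfold Spec_solution
  obtain ⟨⟨p0, hp0, hp0len, hp0none⟩, huniq⟩ := hpre
  -- A's candidate test over keys, B's over edges
  have hsplit : edges.foldl
      (fun (d : PySem.Dict Int (List Int) × PySem.Dict Int Int) p =>
        (d.1.modify p.1 [] (· ++ [p.2]), d.2.modify p.2 0 (· + 1)))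
      (PySem.Dict.empty, PySem.Dict.empty) = (stD edges, enD edges) := by
    rw [PySem.List.foldl_prod_mk
      (f := fun (d : PySem.Dict Int (List Int)) (p : Int × Int) => d.modify p.1 [] (· ++ [p.2]))
      (g := fun (d : PySem.Dict Int Int) (p : Int × Int) => d.modify p.2 0 (· + 1))]
    rfl
  have hmemF : ∀ k : Int,
      (PySem.Set.contains (PySem.Set.ofList (edges.map (·.2))) k = false)
        ↔ (∀ q ∈ edges, q.2 ≠ k) := by
    intro k
    constructor
    · intro h q hq hqk
      have hmem : k ∈ PySem.Set.ofList (edges.map (·.2)) :=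
        (PySem.Set.mem_ofList _ _).mpr (List.mem_map.mpr ⟨q, hq, hqk⟩)
      have hc : PySem.Set.contains (PySem.Set.ofList (edges.map (·.2))) k = true := by
        simp [PySem.Set.contains, List.contains_eq_mem, hmem]
      rw [h] at hc
      exact Bool.false_ne_true hc
    · intro h
      by_cases hk : k ∈ edges.map (·.2)
      · obtain ⟨q, hq, hqk⟩ := List.mem_map.mp hk
        exact absurd hqk (h q hq)
      · simp [PySem.Set.contains, List.contains_eq_mem, PySem.Set.mem_ofList, hk]
  have hAtest : ∀ k : Int,
      (decide (2 ≤ ((stD edges).getD k []).length) && !((enD edges).contains k)) = true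
        ↔ (2 ≤ (edges.filter (fun q => q.1 == k)).length ∧ ∀ q ∈ edges, q.2 ≠ k) := by
    intro k
    rw [Bool.and_eq_true, decide_eq_true_eq, stD_getD, List.length_map, enD_contains,
      Bool.not_eq_true']
    exact and_congr Iff.rfl (hmemF k)
  have hBtest : ∀ q : Int × Int,
      (decide ((2 : Int) ≤ (PySem.Dict.counter (edges.map (·.1))).getD q.1 0)
        && !(PySem.Set.contains (PySem.Set.ofList (edges.map (·.2))) q.1)) = true
        ↔ (2 ≤ (edges.filter (fun r => r.1 == q.1)).length ∧ ∀ r ∈ edges, r.2 ≠ q.1) := by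
    intro q
    have hcnt : (edges.map (·.1)).count q.1 = (edges.filter (fun r => r.1 == q.1)).length := by
      rw [List.count_eq_countP, List.countP_map, List.countP_eq_length_filter]
      rfl
    rw [Bool.and_eq_true, decide_eq_true_eq, PySem.Dict.getD_counter, hcnt,
      Bool.not_eq_true']
    exact and_congr (by exact_mod_cast Iff.rfl) (hmemF q.1)
  -- A's root
  have hroot : ((stD edges).items.foldl
      (fun r p => if decide (2 ≤ p.2.length) && !((enD edges).contains p.1) then some p.1 else r)
      (none : Option Int))
      = (stD edges).keys.reverse.find?
          (fun k => decide (2 ≤ ((stD edges).getD k []).length) && !((enD edges).contains k)) := by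
    rw [PySem.Dict.items_eq_map_keys _ (stD_keys_nodup edges) []]
    rw [List.foldl_map]
    rw [foldl_lastSome
      (fun k : Int => decide (2 ≤ ((stD edges).getD k []).length) && !((enD edges).contains k))
      (fun k : Int => k)]
    simp only [Option.or_none, Option.map_id']
  have hp0mem : p0.1 ∈ (stD edges).keys.reverse := by
    rw [List.mem_reverse, stD_keys]
    exact (PySem.Set.mem_ofList _ _).mpr (List.mem_map.mpr ⟨p0, hp0, rfl⟩)
  have hAfindSome : ((stD edges).keys.reverse.find?
      (fun k => decide (2 ≤ ((stD edges).getD k []).length) && !((enD edges).contains k))).isSome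
      = true :=
    List.find?_isSome.mpr ⟨p0.1, hp0mem, (hAtest p0.1).mpr ⟨hp0len, hp0none⟩⟩
  obtain ⟨r, hr⟩ := Option.isSome_iff_exists.mp hAfindSome
  have hrtest := List.find?_some hr
  have hrCand := (hAtest r).mp hrtest
  have hrkeys : r ∈ (stD edges).keys := List.mem_reverse.mp (List.mem_of_find?_eq_some hr)
  have hredge : ∃ q ∈ edges, q.1 = r := by
    rw [stD_keys] at hrkeys
    obtain ⟨q, hq, hq1⟩ := List.mem_map.mp ((PySem.Set.mem_ofList _ _).mp hrkeys)
    exact ⟨q, hq, hq1⟩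
  -- B's root
  have hBfindSome : (edges.find? (fun q =>
      decide ((2 : Int) ≤ (PySem.Dict.counter (edges.map (·.1))).getD q.1 0)
        && !(PySem.Set.contains (PySem.Set.ofList (edges.map (·.2))) q.1))).isSome = true :=
    List.find?_isSome.mpr ⟨p0, hp0, (hBtest p0).mpr ⟨hp0len, hp0none⟩⟩
  obtain ⟨rp, hrp⟩ := Option.isSome_iff_exists.mp hBfindSome
  have hrptest := List.find?_some hrp
  have hrpCand := (hBtest rp).mp hrptest
  have hrpedge : rp ∈ edges := List.mem_of_find?_eq_some hrp
  -- same root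
  obtain ⟨qr, hqr, hqr1⟩ := hredge
  have hreq : rp.1 = r := by
    have := huniq rp hrpedge qr hqr hrpCand (by rw [hqr1]; exact hrCand)
    rw [← hqr1]; exact this
  -- assemble
  simp only [solution, solution_alt, hsplit, hroot, hr, hrp]
  rw [stD_getD]
  rw [fold_counts (stD edges) _ (edges.length + 1)
    (fun c => (((satLoop edges (edges.length + 1) (PySem.Set.ofList [c])).length : Int),
      ((edges.filter (fun p =>
        PySem.Set.contains (satLoop edges (edges.length + 1) (PySem.Set.ofList [c])) p.1)).length : Int)))
    ((edges.filter (fun p => p.1 == r)).map (·.2)) r 0 0 0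
    (fun c _ => child_pair edges c)]
  rw [hreq]
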